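-- pv_equiv track=rewrite | github.com/AvigdorSR/AdventOfCode2021 | adventday10part2.py | firsterrorsscore
-- ===== SOURCE A (Python) =====
-- def firsterrorsscore (listoffirsterrors):
--     score= 0
--     for x in listoffirsterrors:
--         if x == ")":
--             score += 3
--         if x == "]":
--             score+= 57
--         if x == "}":
--             score += 1197
--         if x == ">":
--             score += 25137
--     return score
-- ===== SOURCE B (Python) =====
-- SCORES = {")": 3, "]": 57, "}": 1197, ">": 25137}
--
-- def firsterrorsscore(listoffirsterrors):
--     n = len(listoffirsterrors)
--     if n == 0:
--         return 0
--     if n == 1: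
--         return SCORES.get(listoffirsterrors[0], 0)
--     mid = n // 2
--     return firsterrorsscore(listoffirsterrors[:mid]) + firsterrorsscore(listoffirsterrors[mid:])
-- ===== Notes on version B (the rewrite author's own statement) =====
-- stated objective: alternative
-- what changed: Replaces the linear branch-and-accumulate loop by a divide-and-conquer recursion that halves the list and adds the two halves' scores, with a score-table lookup at singleton leaves.
import Mathlib
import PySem

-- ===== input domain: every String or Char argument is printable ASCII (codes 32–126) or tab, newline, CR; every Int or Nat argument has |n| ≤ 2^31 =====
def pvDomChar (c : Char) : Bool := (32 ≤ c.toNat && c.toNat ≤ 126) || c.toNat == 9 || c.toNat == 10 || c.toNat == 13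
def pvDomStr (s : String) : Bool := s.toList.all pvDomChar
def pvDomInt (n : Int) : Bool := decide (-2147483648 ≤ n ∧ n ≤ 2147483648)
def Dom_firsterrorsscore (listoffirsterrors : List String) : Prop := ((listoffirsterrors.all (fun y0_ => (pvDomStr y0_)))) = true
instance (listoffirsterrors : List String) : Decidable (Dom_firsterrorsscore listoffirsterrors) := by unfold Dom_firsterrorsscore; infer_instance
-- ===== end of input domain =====

-- B replaces A's branch-and-accumulate loop by a divide-and-conquer recursion over list halves
-- with a score-table lookup at singleton leaves; same results (alternative decomposition).

-- ===== PORT A =====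
-- per-element loop: four independent ifs adding to an accumulator
def firsterrorsscore (listoffirsterrors : List String) : Int :=
  listoffirsterrors.foldl
    (fun score x =>
      let score := if x == ")" then score + 3 else score
      let score := if x == "]" then score + 57 else score
      let score := if x == "}" then score + 1197 else score
      let score := if x == ">" then score + 25137 else score
      score)
    0

-- ===== PORT B =====
-- SCORES = {")": 3, "]": 57, "}": 1197, ">": 25137}
def pvScores : PySem.Dict String Int :=
  PySem.Dict.ofList [(")", 3), ("]", 57), ("}", 1197), (">", 25137)]

-- divide and conquer: empty → 0; singleton → SCORES.get(l[0], 0); else split at len//2 and add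
def firsterrorsscore_alt (listoffirsterrors : List String) : Int :=
  let n := listoffirsterrors.length
  if n = 0 then 0
  else if n = 1 then
    -- listoffirsterrors[0]: total here since n = 1
    match listoffirsterrors with
    | [] => 0
    | x :: _ => pvScores.getD x 0
  else
    let mid := n / 2
    firsterrorsscore_alt (PySem.List.slice listoffirsterrors none (some (mid : Int))) +
      firsterrorsscore_alt (PySem.List.slice listoffirsterrors (some (mid : Int)) none)
termination_by listoffirsterrors.length
decreasing_by
  · simp only [PySem.List.slice_to_natCast, List.length_take]; omega
  · simp only [PySem.List.slice_from_natCast, List.length_drop]; omega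

-- ===== PRECONDITION & SPEC =====
def Spec_firsterrorsscore (listoffirsterrors : List String) (out : Int) : Prop := out = firsterrorsscore_alt listoffirsterrors
instance (listoffirsterrors : List String) (out : Int) : Decidable (Spec_firsterrorsscore listoffirsterrors out) := by unfold Spec_firsterrorsscore; infer_instance

-- ===== CLAIM (what is proved, stated in full; the proofs are below) =====
def Claim_equal_firsterrorsscore : Prop := ∀ (listoffirsterrors : List String), Dom_firsterrorsscore listoffirsterrors → Spec_firsterrorsscore listoffirsterrors (firsterrorsscore listoffirsterrors)

-- ===== LEMMAS AND PROOFS =====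
-- the common closed form: the weighted bracket counts
def pvWeight (l : List String) : Int :=
  3 * (l.count ")" : Int) + 57 * (l.count "]" : Int)
    + 1197 * (l.count "}" : Int) + 25137 * (l.count ">" : Int)

theorem firsterrorsscore_foldl (l : List String) (s : Int) :
    l.foldl
      (fun score x =>
        let score := if x == ")" then score + 3 else score
        let score := if x == "]" then score + 57 else score
        let score := if x == "}" then score + 1197 else score
        let score := if x == ">" then score + 25137 else score
        score)
      s
    = s + pvWeight l := by
  induction l generalizing s with
  | nil => simp [pvWeight]
  | cons h t ih =>
    simp only [List.foldl_cons, ih, pvWeight, List.count_cons]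
    by_cases h1 : h = ")" <;> by_cases h2 : h = "]" <;> by_cases h3 : h = "}" <;>
      by_cases h4 : h = ">" <;> simp_all <;> ring

theorem pvScores_eq :
    pvScores = PySem.Dict.mk [(")", 3), ("]", 57), ("}", 1197), (">", 25137)] := by decide

theorem pvWeight_singleton (x : String) :
    pvWeight [x] = pvScores.getD x 0 := by
  simp only [pvWeight, List.count_singleton, pvScores_eq, PySem.Dict.getD,
    PySem.Dict.get?, beq_iff_eq]
  split_ifs with a b c d <;> subst_vars <;> simp_all
  rename_i b c d
  rw [List.find?_eq_none.mpr]
  · simp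
  · intro p hp
    simp only [List.mem_cons, List.not_mem_nil, or_false] at hp
    simp only [beq_iff_eq]
    rcases hp with h | h | h | h <;> subst h <;>
      first
        | exact Ne.symm a | exact Ne.symm b | exact Ne.symm c | exact Ne.symm d

theorem pvWeight_append (l₁ l₂ : List String) :
    pvWeight (l₁ ++ l₂) = pvWeight l₁ + pvWeight l₂ := by
  simp only [pvWeight, List.count_append]
  push_cast
  ring

theorem alt_eq_weight (l : List String) : firsterrorsscore_alt l = pvWeight l := by
  induction hl : l.length using Nat.strong_induction_on generalizing l with
  | _ n ih =>
    rw [firsterrorsscore_alt.eq_def]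
    subst hl
    by_cases h0 : l.length = 0
    · simp_all [pvWeight, List.length_eq_zero_iff.mp h0]
    · by_cases h1 : l.length = 1
      · simp only [h1, if_true]
        match l, h1 with
        | [x], _ => exact (pvWeight_singleton x).symm
      · simp only [h0, h1, if_false]
        rw [PySem.List.slice_to_natCast, PySem.List.slice_from_natCast,
            ih _ (by simp; omega) _ rfl, ih _ (by simp; omega) _ rfl,
            ← pvWeight_append, List.take_append_drop]

-- ===== VERDICT (by name: the statement is the Claim_ definition above) =====
theorem firsterrorsscore_spec : Claim_equal_firsterrorsscore := by
  intro l _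
  show _ = _
  rw [firsterrorsscore, firsterrorsscore_foldl, alt_eq_weight, zero_add]
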